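-- pv_equiv track=rewrite | github.com/sherlockjjj2/arxiv-rag | arxiv_rag/evaluate.py | find_first_correct_rank
-- ===== SOURCE A (Python) =====
-- from typing import Iterable, Literal, Mapping, Sequence
--
-- def find_first_correct_rank(
--     retrieved: Sequence[str],
--     ground_truth: Iterable[str],
-- ) -> int | None:
--     """Find the first rank containing a ground truth chunk.
--
--     Args:
--         retrieved: Retrieved chunk UIDs in rank order.
--         ground_truth: Ground truth chunk UIDs.
--     Returns:
--         Rank of the first correct result, or None if none found.
--     """
--
--     ground_truth_set = {uid for uid in ground_truth if uid}
--     if not ground_truth_set: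
--         return None
--
--     for rank, uid in enumerate(retrieved, start=1):
--         if uid in ground_truth_set:
--             return rank
--     return None
-- ===== SOURCE B (Python) =====
-- def find_first_correct_rank(retrieved, ground_truth):
--     """Rank of the first retrieved uid that is a (non-empty) ground-truth uid, else None.
--
--     Builds a dict of first 1-based positions over retrieved once, then
--     minimizes that position over the ground-truth uids.
--     """
--     ranks = {}
--     for pos, uid in enumerate(retrieved, start=1):
--         if uid not in ranks:
--             ranks[uid] = pos
--     best = None
--     for uid in ground_truth:
--         if uid:
--             r = ranks.get(uid)
--             if r is not None and (best is None or r < best):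
--                 best = r
--     return best
-- ===== Notes on version B (the rewrite author's own statement) =====
-- stated objective: alternative
-- what changed: Instead of materializing a ground-truth set and scanning retrieved for the first member, B indexes retrieved once into a first-position dict and takes the minimum indexed position over ground_truth, with no early return and no emptiness special case.
import Mathlib
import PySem

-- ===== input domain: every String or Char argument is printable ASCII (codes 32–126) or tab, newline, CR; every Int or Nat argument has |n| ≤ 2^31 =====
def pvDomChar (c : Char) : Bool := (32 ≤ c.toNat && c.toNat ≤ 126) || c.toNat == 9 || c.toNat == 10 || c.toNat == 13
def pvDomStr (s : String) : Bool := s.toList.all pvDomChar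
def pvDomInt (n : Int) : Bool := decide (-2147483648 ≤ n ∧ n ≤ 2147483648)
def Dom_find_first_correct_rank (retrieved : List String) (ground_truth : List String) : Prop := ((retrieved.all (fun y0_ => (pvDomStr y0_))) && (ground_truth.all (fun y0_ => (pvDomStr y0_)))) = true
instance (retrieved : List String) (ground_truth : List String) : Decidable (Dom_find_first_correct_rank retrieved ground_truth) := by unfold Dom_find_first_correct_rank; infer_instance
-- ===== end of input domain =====

-- B replaces A's build-set-then-scan-retrieved with a first-position index over retrieved minimized over ground_truth (alternative decomposition, same cost).


-- ===== PORT A =====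
-- 'for rank, uid in enumerate(retrieved, start=1): if uid in ground_truth_set: return rank'
def ffcrLoopA (gts : PySem.Set String) : List (Int × String) → Option Int
  | [] => none
  | (rank, uid) :: rest => if PySem.Set.contains gts uid then some rank else ffcrLoopA gts rest

def find_first_correct_rank (retrieved : List String) (ground_truth : List String) : Option Int :=
  let ground_truth_set : PySem.Set String := PySem.Set.ofList (ground_truth.filter (fun uid => uid ≠ ""))
  if ground_truth_set = [] then none
  else ffcrLoopA ground_truth_set (PySem.List.enumerate retrieved 1)

-- ===== PORT B =====
-- 'for pos, uid in enumerate(retrieved, start=1): if uid not in ranks: ranks[uid] = pos'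
def ffcrBuild : List (Int × String) → PySem.Dict String Int → PySem.Dict String Int
  | [], d => d
  | (pos, uid) :: rest, d =>
      ffcrBuild rest (if PySem.Dict.contains d uid then d else PySem.Dict.insert d uid pos)

-- 'for uid in ground_truth: if uid: r = ranks.get(uid); if r is not None and (best is None or r < best): best = r'
def ffcrBest (ranks : PySem.Dict String Int) : List String → Option Int → Option Int
  | [], best => best
  | uid :: rest, best =>
      ffcrBest ranks rest
        (if uid ≠ "" then
          match PySem.Dict.get? ranks uid with
          | some r =>
            match best with
            | none => some r
            | some b => if r < b then some r else some b
          | none => best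
         else best)

def find_first_correct_rank_alt (retrieved : List String) (ground_truth : List String) : Option Int :=
  ffcrBest (ffcrBuild (PySem.List.enumerate retrieved 1) PySem.Dict.empty) ground_truth none

-- ===== PRECONDITION & SPEC =====
def Spec_find_first_correct_rank (retrieved : List String) (ground_truth : List String) (out : Option Int) : Prop := out = find_first_correct_rank_alt retrieved ground_truth
instance (retrieved : List String) (ground_truth : List String) (out : Option Int) : Decidable (Spec_find_first_correct_rank retrieved ground_truth out) := by unfold Spec_find_first_correct_rank; infer_instance

-- ===== CLAIM (what is proved, stated in full; the proofs are below) =====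
def Claim_equal_find_first_correct_rank : Prop := ∀ (retrieved : List String) (ground_truth : List String), Dom_find_first_correct_rank retrieved ground_truth → Spec_find_first_correct_rank retrieved ground_truth (find_first_correct_rank retrieved ground_truth)

-- ===== LEMMAS AND PROOFS =====

-- reference function: first 1-based-from-k rank whose uid satisfies p
def pvFirstRank (p : String → Bool) (k : Int) : List String → Option Int
  | [] => none
  | u :: rest => if p u then some k else pvFirstRank p (k + 1) rest

theorem pvFirstRank_congr (p q : String → Bool) (h : ∀ u, p u = q u) :
    ∀ (xs : List String) (k : Int), pvFirstRank p k xs = pvFirstRank q k xs := by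
  intro xs
  induction xs with
  | nil => intro k; rfl
  | cons x rest ih => intro k; simp [pvFirstRank, h x, ih]

theorem pvFirstRank_ge (p : String → Bool) :
    ∀ (xs : List String) (k r : Int), pvFirstRank p k xs = some r → k ≤ r := by
  intro xs
  induction xs with
  | nil => intro k r h; simp [pvFirstRank] at h
  | cons x rest ih =>
      intro k r h
      simp only [pvFirstRank] at h
      by_cases hx : p x = true
      · simp [hx] at h; omega
      · simp [hx] at h; have := ih (k + 1) r h; omega

theorem pvFirstRank_none (p : String → Bool) :
    ∀ (xs : List String) (k : Int), (∀ x ∈ xs, p x = false) → pvFirstRank p k xs = none := by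
  intro xs
  induction xs with
  | nil => intro k _; rfl
  | cons x rest ih =>
      intro k h
      simp [pvFirstRank, h x (by simp), ih (k + 1) (fun y hy => h y (by simp [hy]))]

theorem ffcrLoopA_enumerate (gts : PySem.Set String) :
    ∀ (xs : List String) (k : Int),
      ffcrLoopA gts (PySem.List.enumerate xs k)
        = pvFirstRank (fun u => PySem.Set.contains gts u) k xs := by
  intro xs
  induction xs with
  | nil => intro k; rfl
  | cons x rest ih =>
      intro k
      simp [PySem.List.enumerate_cons, ffcrLoopA, pvFirstRank, ih]

theorem ffcrBuild_get? :
    ∀ (xs : List String) (k : Int) (d : PySem.Dict String Int) (u : String),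
      PySem.Dict.get? (ffcrBuild (PySem.List.enumerate xs k) d) u
        = match PySem.Dict.get? d u with
          | some v => some v
          | none => pvFirstRank (fun v => v == u) k xs := by
  intro xs
  induction xs with
  | nil => intro k d u; cases h : PySem.Dict.get? d u <;> simp [PySem.List.enumerate_nil, ffcrBuild, h, pvFirstRank]
  | cons x rest ih =>
      intro k d u
      rw [PySem.List.enumerate_cons]
      simp only [ffcrBuild]
      by_cases hc : PySem.Dict.contains d x = true
      · rw [if_pos hc, ih]
        cases h : PySem.Dict.get? d u with
        | some v => rfl
        | none =>
            by_cases hxu : x = u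
            · subst hxu
              rw [PySem.Dict.contains_eq_isSome_get?, h] at hc
              simp at hc
            · simp [pvFirstRank, hxu]
      · rw [if_neg hc, ih]
        by_cases hxu : u = x
        · subst hxu
          rw [PySem.Dict.get?_insert_self]
          rw [PySem.Dict.contains_eq_isSome_get?] at hc
          cases h : PySem.Dict.get? d u with
          | some v => rw [h] at hc; simp at hc
          | none => simp [pvFirstRank]
        · rw [PySem.Dict.get?_insert, if_neg hxu]
          cases h : PySem.Dict.get? d u with
          | some v => rfl
          | none =>
              have hxu' : x ≠ u := fun h' => hxu h'.symm
              simp [pvFirstRank, hxu']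

theorem ffcrBest_none (ranks : PySem.Dict String Int) :
    ∀ (gt : List String) (best : Option Int),
      (∀ u ∈ gt, u ≠ "" → PySem.Dict.get? ranks u = none) →
      ffcrBest ranks gt best = best := by
  intro gt
  induction gt with
  | nil => intro best _; rfl
  | cons u rest ih =>
      intro best h
      simp only [ffcrBest]
      by_cases hu : u = ""
      · simp [hu, ih _ (fun v hv => h v (by simp [hv]))]
      · simp [hu, h u (by simp) hu, ih _ (fun v hv => h v (by simp [hv]))]

theorem ffcrBest_lb (ranks : PySem.Dict String Int) (k : Int)
    (hf : ∀ (u : String) (r : Int), PySem.Dict.get? ranks u = some r → k ≤ r) :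
    ∀ (gt : List String) (best : Option Int),
      (∀ b, best = some b → k ≤ b) →
      ∀ b, ffcrBest ranks gt best = some b → k ≤ b := by
  intro gt
  induction gt with
  | nil => intro best hb b h; exact hb b h
  | cons u rest ih =>
      intro best hb b h
      simp only [ffcrBest] at h
      refine ih _ ?_ b h
      intro b' hb'
      by_cases hu : u = ""
      · simp [hu] at hb'; exact hb b' hb'
      · simp [hu] at hb'
        cases hg : PySem.Dict.get? ranks u with
        | none => rw [hg] at hb'; exact hb b' hb'
        | some r =>
            rw [hg] at hb'
            have hkr := hf u r hg
            cases best with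
            | none => simp at hb'; omega
            | some b0 =>
                have hkb0 := hb b0 rfl
                by_cases hlt : r < b0 <;> simp [hlt] at hb' <;> omega

theorem ffcrBest_ub (ranks : PySem.Dict String Int) (r : Int) :
    ∀ (gt : List String) (best : Option Int),
      ((∃ b, best = some b ∧ b ≤ r) ∨ (∃ u, u ∈ gt ∧ u ≠ "" ∧ PySem.Dict.get? ranks u = some r)) →
      ∃ b, ffcrBest ranks gt best = some b ∧ b ≤ r := by
  intro gt
  induction gt with
  | nil =>
      intro best h
      rcases h with ⟨b, hb, hbr⟩ | ⟨u, hu, _, _⟩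
      · exact ⟨b, hb, hbr⟩
      · simp at hu
  | cons u rest ih =>
      intro best h
      simp only [ffcrBest]
      rcases h with ⟨b, hb, hbr⟩ | ⟨v, hv, hvne, hvr⟩
      · subst hb
        refine ih _ (Or.inl ?_)
        by_cases hu : u = ""
        · exact ⟨b, by simp [hu], hbr⟩
        · cases hg : PySem.Dict.get? ranks u with
          | none => exact ⟨b, by simp [hu], hbr⟩
          | some r' =>
              by_cases hlt : r' < b
              · exact ⟨r', by simp [hu, hlt], by omega⟩
              · exact ⟨b, by simp [hu, hlt], hbr⟩
      · rcases List.mem_cons.mp hv with hvu | hvrest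
        · subst hvu
          refine ih _ (Or.inl ?_)
          cases best with
          | none => exact ⟨r, by simp [hvne, hvr], le_refl r⟩
          | some b0 =>
              by_cases hlt : r < b0
              · exact ⟨r, by simp [hvne, hvr, hlt], le_refl r⟩
              · exact ⟨b0, by simp [hvne, hvr, hlt], by omega⟩
        · exact ih _ (Or.inr ⟨v, hvrest, hvne, hvr⟩)

theorem ffcrBest_congr (r1 r2 : PySem.Dict String Int) :
    ∀ (gt : List String),
      (∀ u ∈ gt, u ≠ "" → PySem.Dict.get? r1 u = PySem.Dict.get? r2 u) →
      ∀ best, ffcrBest r1 gt best = ffcrBest r2 gt best := by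
  intro gt
  induction gt with
  | nil => intro _ best; rfl
  | cons u rest ih =>
      intro h best
      simp only [ffcrBest]
      by_cases hu : u = ""
      · simp [hu, ih (fun v hv => h v (by simp [hv]))]
      · rw [h u (by simp) hu, ih (fun v hv => h v (by simp [hv]))]

-- the crux: minimizing the first-position index over gt equals the first scan hit
theorem ffcrBest_eq_pvFirstRank (gt : List String) :
    ∀ (xs : List String) (k : Int) (ranks : PySem.Dict String Int),
      (∀ u, PySem.Dict.get? ranks u = pvFirstRank (fun v => v == u) k xs) →
      ffcrBest ranks gt none = pvFirstRank (fun u => decide (u ≠ "" ∧ u ∈ gt)) k xs := by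
  intro xs
  induction xs with
  | nil =>
      intro k ranks hr
      rw [ffcrBest_none ranks gt none (fun u _ _ => by rw [hr u]; rfl)]
      rfl
  | cons x rest ih =>
      intro k ranks hr
      by_cases hx : x ≠ "" ∧ x ∈ gt
      · have hgx : PySem.Dict.get? ranks x = some k := by rw [hr x]; simp [pvFirstRank]
        obtain ⟨b, hb, hbr⟩ := ffcrBest_ub ranks k gt none (Or.inr ⟨x, hx.2, hx.1, hgx⟩)
        have hlb := ffcrBest_lb ranks k
          (fun u r h => pvFirstRank_ge _ (x :: rest) k r (by rw [← hr u]; exact h))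
          gt none (by simp) b hb
        have hbk : b = k := le_antisymm hbr hlb
        subst hbk
        rw [hb]
        simp [pvFirstRank, hx]
      · have hne : ∀ u ∈ gt, u ≠ "" → u ≠ x := by
          intro u hu hune heq
          subst heq
          exact hx ⟨hune, hu⟩
        have hd2 : ∀ u, PySem.Dict.get? (ffcrBuild (PySem.List.enumerate rest (k + 1)) PySem.Dict.empty) u
            = pvFirstRank (fun v => v == u) (k + 1) rest := by
          intro u
          rw [ffcrBuild_get?]
          simp [PySem.Dict.get?_empty]
        rw [ffcrBest_congr ranks (ffcrBuild (PySem.List.enumerate rest (k + 1)) PySem.Dict.empty) gt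
          (fun u hu hune => by
            have hxu : x ≠ u := fun h => hne u hu hune h.symm
            rw [hr u, hd2 u]
            simp [pvFirstRank, hxu]) none]
        rw [ih (k + 1) _ hd2]
        simp [pvFirstRank, hx]

theorem set_contains_char (gt : List String) (u : String) :
    PySem.Set.contains (PySem.Set.ofList (gt.filter (fun uid => uid ≠ ""))) u
      = decide (u ≠ "" ∧ u ∈ gt) := by
  rw [Bool.eq_iff_iff]
  simp [PySem.Set.contains, PySem.Set.mem_ofList, List.mem_filter, and_comm]

-- ===== VERDICT (by name: the statement is the Claim_ definition above) =====
theorem find_first_correct_rank_spec : Claim_equal_find_first_correct_rank := by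
  intro retrieved gt _
  unfold Spec_find_first_correct_rank find_first_correct_rank find_first_correct_rank_alt
  have hd : ∀ u, PySem.Dict.get? (ffcrBuild (PySem.List.enumerate retrieved 1) PySem.Dict.empty) u
      = pvFirstRank (fun v => v == u) 1 retrieved := by
    intro u
    rw [ffcrBuild_get?]
    simp [PySem.Dict.get?_empty]
  rw [ffcrBest_eq_pvFirstRank gt retrieved 1 _ hd]
  by_cases hempty : PySem.Set.ofList (gt.filter (fun uid => uid ≠ "")) = ([] : List String)
  · simp only [hempty]
    refine (pvFirstRank_none _ retrieved 1 ?_).symm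
    intro x _
    simp only [decide_eq_false_iff_not]
    rintro ⟨hne, hmem⟩
    have hx : x ∈ gt.filter (fun uid => uid ≠ "") := List.mem_filter.mpr ⟨hmem, by simp [hne]⟩
    have hx2 : x ∈ PySem.Set.ofList (gt.filter (fun uid => uid ≠ "")) := (PySem.Set.mem_ofList _ _).mpr hx
    rw [hempty] at hx2
    exact List.not_mem_nil hx2
  · simp only [if_neg hempty]
    rw [ffcrLoopA_enumerate]
    exact pvFirstRank_congr _ _ (fun u => set_contains_char gt u) retrieved 1
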